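-- pv_equiv track=rewrite | github.com/jxu/op-reject-rule | src/172.py | dp
-- ===== SOURCE A (Python) =====
-- def dp(rem, max_d=9):
--     if rem == 0:
--         yield [0]*10
--         return
--     for d in range(max_d+1):
--         for hist in dp(rem-1, d):
--             hist[d] += 1
--             if hist[d] <= 3:
--                 yield hist
-- ===== SOURCE B (Python) =====
-- def dp(rem, max_d=9):
--     # recursion over digit values: choose the multiplicity c of digit max_d,
--     # then fill the remaining count with digits < max_d
--     if rem == 0:
--         yield [0]*10
--         return
--     if max_d < 0:
--         return
--     for c in range(min(3, rem) + 1):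
--         for hist in dp(rem - c, max_d - 1):
--             hist[max_d] = c
--             yield hist
-- ===== Notes on version B (the rewrite author's own statement) =====
-- stated objective: alternative
-- what changed: A recurses on the number of digits still to place (one digit at a time, nonincreasing); B recurses over digit values from max_d down, choosing each digit's whole multiplicity 0..min(3,rem) at once, which enforces the count<=3 limit natively instead of A's place-then-filter.
import Mathlib
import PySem

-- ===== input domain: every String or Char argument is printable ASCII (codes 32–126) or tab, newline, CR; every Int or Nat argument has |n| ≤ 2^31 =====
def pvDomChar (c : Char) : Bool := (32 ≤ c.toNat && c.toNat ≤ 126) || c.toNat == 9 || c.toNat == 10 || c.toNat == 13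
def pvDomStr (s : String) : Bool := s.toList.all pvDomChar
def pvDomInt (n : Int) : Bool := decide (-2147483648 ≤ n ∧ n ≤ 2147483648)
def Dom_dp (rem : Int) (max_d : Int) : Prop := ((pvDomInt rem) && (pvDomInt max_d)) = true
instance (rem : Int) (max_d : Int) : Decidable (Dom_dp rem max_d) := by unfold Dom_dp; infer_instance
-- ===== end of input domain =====

-- B re-derives the same histogram list by a recursion over digit VALUES (choosing each digit's
-- multiplicity 0..3) instead of A's recursion over the count of digits still to place; same
-- output in the same order, proven below.  Equivalence is about return values (A is a generator,
-- consumed to a list).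

-- ===== PORT A =====
-- fuel = rem.toNat + 1: the recursion decreases rem by exactly 1 per level and stops at 0;
-- Pre_ excludes rem < 0 with max_d ≥ 0, where Python recurses forever (RecursionError).
-- hist[d] += 1 via getD/set is exact for 0 ≤ d ≤ 9; d ≥ 10 raises IndexError in Python (outside Pre_).
def dpAgo : Nat → Int → Int → List (List Int)
  | 0, _, _ => []
  | fuel+1, rem, max_d =>
    if rem = 0 then [List.replicate 10 (0 : Int)]
    else
      (PySem.List.pyRange 0 (max_d + 1) 1).flatMap (fun d =>
        (dpAgo fuel (rem - 1) d).filterMap (fun hist =>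
          let h2 := hist.set d.toNat (hist.getD d.toNat 0 + 1)
          if h2.getD d.toNat 0 ≤ 3 then some h2 else none))

def dp (rem : Int) (max_d : Int) : List (List Int) := dpAgo (rem.toNat + 1) rem max_d

-- ===== PORT B =====
-- fuel m = (max_d+1).toNat: the recursion decreases max_d by 1 per level and stops below 0;
-- hist[max_d] = c is exact for max_d ≤ 9 (max_d ≥ 10 raises IndexError in Python, outside Pre_).
def dpBgo : Int → Nat → List (List Int)
  | rem, 0 => if rem = 0 then [List.replicate 10 (0 : Int)] else []
  | rem, m+1 =>
    if rem = 0 then [List.replicate 10 (0 : Int)]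
    else
      (PySem.List.pyRange 0 (min 3 rem + 1) 1).flatMap (fun c =>
        (dpBgo (rem - c) m).map (fun hist => hist.set m c))

def dp_alt (rem : Int) (max_d : Int) : List (List Int) := dpBgo rem (max_d + 1).toNat

-- ===== PRECONDITION & SPEC =====
-- Pre_ is exactly the set of inputs on which Python A returns: rem < 0 with max_d ≥ 0 makes A
-- recurse forever (RecursionError), and rem > 0 with max_d ≥ 10 makes A index past the 10-slot
-- histogram (IndexError).
def Pre_dp (rem : Int) (max_d : Int) : Prop :=
  rem = 0 ∨ (0 < rem ∧ max_d ≤ 9) ∨ (rem < 0 ∧ max_d < 0)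
instance (rem : Int) (max_d : Int) : Decidable (Pre_dp rem max_d) := by unfold Pre_dp; infer_instance

def pvWitness_dp : Int × Int := (3, 9)

def Spec_dp (rem : Int) (max_d : Int) (out : List (List Int)) : Prop := out = dp_alt rem max_d
instance (rem : Int) (max_d : Int) (out : List (List Int)) : Decidable (Spec_dp rem max_d out) := by unfold Spec_dp; infer_instance

-- ===== CLAIM (what is proved, stated in full; the proofs are below) =====
def Claim_equal_dp : Prop := ∀ (rem : Int) (max_d : Int), Dom_dp rem max_d → Pre_dp rem max_d → Spec_dp rem max_d (dp rem max_d)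

-- ===== LEMMAS AND PROOFS =====

-- small list helpers
theorem pv_getD_set_self (l : List Int) (m : Nat) (a : Int) (h : m < l.length) :
    (l.set m a).getD m 0 = a := by
  rw [List.getD_eq_getElem _ _ (by simpa using h)]
  simp [List.getElem_set_self]

theorem pv_getD_set_ne (l : List Int) (m k : Nat) (a : Int) (h : k ≠ m) :
    (l.set m a).getD k 0 = l.getD k 0 := by
  simp [List.getD_eq_getElem?_getD, List.getElem?_set_ne (Ne.symm h)]

theorem pv_set_eq_self (l : List Int) (m : Nat) (h : l.getD m 0 = 0) :
    l.set m 0 = l := by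
  apply List.ext_getElem?
  intro k
  by_cases hk : k = m
  · subst hk
    by_cases hm : k < l.length
    · rw [List.getElem?_set_self (by simpa using hm)]
      rw [List.getD_eq_getElem _ _ (by simpa using hm)] at h
      simp [List.getElem?_eq_getElem hm, h]
    · rw [List.getElem?_eq_none (by omega : l.length ≤ k),
          List.getElem?_eq_none (by simpa using (by omega : l.length ≤ k))]
  · rw [List.getElem?_set_ne (Ne.symm hk)]

theorem pv_filterMap_eq_map {α β : Type} (l : List α) (f : α → Option β) (g : α → β)
    (h : ∀ a ∈ l, f a = some (g a)) : l.filterMap f = l.map g := by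
  induction l with
  | nil => rfl
  | cons x xs ih =>
    simp [h x (by simp), ih (fun a ha => h a (by simp [ha]))]

theorem pv_map_id_of {α : Type} (l : List α) (f : α → α) (h : ∀ a ∈ l, f a = a) :
    l.map f = l := by
  simp [List.map_congr_left h]

-- every histogram produced by dpBgo rem m has length 10 and zeros at indices ≥ m
theorem dpBgo_inv (m : Nat) : ∀ (rem : Int) (h : List Int), h ∈ dpBgo rem m →
    h.length = 10 ∧ ∀ k, m ≤ k → h.getD k 0 = 0 := by
  induction m with
  | zero =>
    intro rem h hh
    simp only [dpBgo] at hh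
    split at hh
    · simp at hh
      subst hh
      refine ⟨by simp, fun k _ => ?_⟩
      rcases k with _|_|_|_|_|_|_|_|_|_|k <;> simp [List.getD_eq_getElem?_getD]
    · simp at hh
  | succ m ih =>
    intro rem h hh
    simp only [dpBgo] at hh
    split at hh
    · simp at hh
      subst hh
      refine ⟨by simp, fun k _ => ?_⟩
      rcases k with _|_|_|_|_|_|_|_|_|_|k <;> simp [List.getD_eq_getElem?_getD]
    · simp only [List.mem_flatMap, List.mem_map] at hh
      obtain ⟨c, _, h', hh', rfl⟩ := hh
      obtain ⟨hlen, hz⟩ := ih (rem - c) h' hh'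
      refine ⟨by simpa using hlen, fun k hk => ?_⟩
      rw [pv_getD_set_ne _ _ _ _ (by omega)]
      exact hz k (by omega)

theorem dpBgo_zero (m : Nat) : dpBgo 0 m = [List.replicate 10 (0 : Int)] := by
  cases m <;> simp [dpBgo]

-- one-step unfoldings of the two recursions (rem ≠ 0)
theorem dpAgo_succ (fuel : Nat) (rem max_d : Int) (h : rem ≠ 0) :
    dpAgo (fuel + 1) rem max_d =
      (PySem.List.pyRange 0 (max_d + 1) 1).flatMap (fun d =>
        (dpAgo fuel (rem - 1) d).filterMap (fun hist =>
          let h2 := hist.set d.toNat (hist.getD d.toNat 0 + 1)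
          if h2.getD d.toNat 0 ≤ 3 then some h2 else none)) := by
  conv_lhs => rw [dpAgo]
  rw [if_neg h]

theorem dpBgo_succ (rem : Int) (m : Nat) (h : rem ≠ 0) :
    dpBgo rem (m + 1) =
      (PySem.List.pyRange 0 (min 3 rem + 1) 1).flatMap (fun c =>
        (dpBgo (rem - c) m).map (fun hist => hist.set m c)) := by
  conv_lhs => rw [dpBgo]
  rw [if_neg h]

-- one c-group: incrementing slot m on histograms whose slot m holds c gives the (c+1)-group (or nothing if c = 3)
theorem step (r : Int) (m : Nat) (hm : m ≤ 9) (c : Int) :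
    ((dpBgo r m).map (fun h => h.set m c)).filterMap (fun hist =>
        let h2 := hist.set m (hist.getD m 0 + 1)
        if h2.getD m 0 ≤ 3 then some h2 else none) =
    if c + 1 ≤ 3 then (dpBgo r m).map (fun h => h.set m (c + 1)) else [] := by
  rw [List.filterMap_map]
  split
  · next hc =>
    apply pv_filterMap_eq_map
    intro h hh
    obtain ⟨hlen, hz⟩ := dpBgo_inv m r h hh
    have h1 : (h.set m c).getD m 0 = c := pv_getD_set_self _ _ _ (by omega)
    have h3 : (h.set m (c + 1)).getD m 0 = c + 1 := pv_getD_set_self _ _ _ (by omega)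
    simp only [Function.comp, h1, List.set_set, h3, if_pos hc]
  · next hc =>
    apply List.filterMap_eq_nil_iff.mpr
    intro h hh
    obtain ⟨hlen, hz⟩ := dpBgo_inv m r h hh
    have h1 : (h.set m c).getD m 0 = c := pv_getD_set_self _ _ _ (by omega)
    have h3 : (h.set m (c + 1)).getD m 0 = c + 1 := pv_getD_set_self _ _ _ (by omega)
    simp only [Function.comp, h1, List.set_set, h3, if_neg hc]

-- key step: A's "place one more digit m" pass over dpBgo r (m+1) equals B's c ≥ 1 groups at rem = r+1
theorem star (r : Int) (hr : 0 ≤ r) (m : Nat) (hm : m ≤ 9) :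
    (dpBgo r (m+1)).filterMap (fun hist =>
        let h2 := hist.set m (hist.getD m 0 + 1)
        if h2.getD m 0 ≤ 3 then some h2 else none) =
    (PySem.List.pyRange 1 (min 3 (r + 1) + 1) 1).flatMap (fun c =>
        (dpBgo (r + 1 - c) m).map (fun hist => hist.set m c)) := by
  by_cases hr0 : r = 0
  · subst hr0
    rw [dpBgo_zero]
    have hz : (List.replicate 10 (0 : Int)).getD m 0 = 0 := by
      rcases m with _|_|_|_|_|_|_|_|_|_|m <;> simp [List.getD_eq_getElem?_getD]
    have h1 : ((List.replicate 10 (0 : Int)).set m 1).getD m 0 = 1 :=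
      pv_getD_set_self _ _ _ (by simp; omega)
    have hrange : PySem.List.pyRange 1 (min 3 ((0 : Int) + 1) + 1) 1 = [1] := by decide
    rw [hrange]
    simp only [List.flatMap_cons, List.flatMap_nil, List.filterMap_cons, List.filterMap_nil]
    rw [show (0 : Int) + 1 - 1 = 0 by ring, dpBgo_zero]
    rw [hz]
    have h1' : (((List.replicate 10 (0 : Int)).set m 1)[m]?).getD 0 = 1 := by
      rw [← List.getD_eq_getElem?_getD]; exact h1
    norm_num [h1']
  · have hunf : dpBgo r (m+1) =
        (PySem.List.pyRange 0 (min 3 r + 1) 1).flatMap (fun c =>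
          (dpBgo (r - c) m).map (fun hist => hist.set m c)) := by
      simp only [dpBgo, if_neg hr0]
    rw [hunf, List.filterMap_flatMap]
    by_cases hr1 : r = 1
    · subst hr1
      rw [show PySem.List.pyRange 0 (min 3 (1 : Int) + 1) 1 = [0, 1] by decide,
          show PySem.List.pyRange 1 (min 3 ((1 : Int) + 1) + 1) 1 = [1, 2] by decide]
      simp only [List.flatMap_cons, List.flatMap_nil, step _ _ hm]
      norm_num
    · by_cases hr2 : r = 2
      · subst hr2
        rw [show PySem.List.pyRange 0 (min 3 (2 : Int) + 1) 1 = [0, 1, 2] by decide,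
            show PySem.List.pyRange 1 (min 3 ((2 : Int) + 1) + 1) 1 = [1, 2, 3] by decide]
        simp only [List.flatMap_cons, List.flatMap_nil, step _ _ hm]
        norm_num
      · have h3r : 3 ≤ r := by omega
        rw [show PySem.List.pyRange 0 (min 3 r + 1) 1 = [0, 1, 2, 3] by
              rw [show min 3 r = 3 by omega]; decide,
            show PySem.List.pyRange 1 (min 3 (r + 1) + 1) 1 = [1, 2, 3] by
              rw [show min 3 (r + 1) = 3 by omega]; decide]
        simp only [List.flatMap_cons, List.flatMap_nil, step _ _ hm]
        rw [show r - (0 : Int) = r by ring, show r + 1 - (1 : Int) = r by ring,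
            show r + 1 - (2 : Int) = r - 1 by ring, show r + 1 - (3 : Int) = r - 2 by ring]
        norm_num

-- the main equivalence on the natural domain
theorem main_lemma (n : Nat) : ∀ m : Nat, m ≤ 10 →
    dpAgo (n + 1) (n : Int) ((m : Int) - 1) = dpBgo (n : Int) m := by
  induction n with
  | zero =>
    intro m hm
    norm_num [dpAgo, dpBgo_zero]
  | succ n ihn =>
    intro m
    induction m with
    | zero =>
      intro _
      have hne : (((n : Int) + 1)) ≠ 0 := by omega
      push_cast
      rw [dpAgo_succ _ _ _ hne]
      rw [show (-1 : Int) + 1 = 0 by ring, PySem.List.pyRange_one_eq_nil le_rfl]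
      simp [dpBgo, hne]
    | succ m ihm =>
      intro hm
      have hm9 : m ≤ 9 := by omega
      have hne : (((n : Int) + 1)) ≠ 0 := by omega
      push_cast
      rw [show ((m : Int) + 1 - 1) = (m : Int) by ring]
      -- unfold A at max_d = m and split off the last digit d = m
      rw [dpAgo_succ _ _ _ hne]
      rw [show ((n : Int) + 1 - 1) = (n : Int) by ring,
          PySem.List.pyRange_one_succ_right (show (0 : Int) ≤ (m : Int) by positivity),
          List.flatMap_append]
      simp only [List.flatMap_cons, List.flatMap_nil, List.append_nil, Int.toNat_natCast]
      -- first chunk: digits < m, by the inner IH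
      have h1 := ihm (by omega)
      push_cast at h1
      rw [dpAgo_succ _ _ _ hne] at h1
      rw [show ((m : Int) - 1 + 1) = (m : Int) by ring,
          show ((n : Int) + 1 - 1) = (n : Int) by ring] at h1
      rw [h1]
      -- second chunk: digit m placed once more, by the outer IH and the key lemma
      have h2 := ihn (m + 1) (by omega)
      push_cast at h2
      rw [show ((m : Int) + 1 - 1) = (m : Int) by ring] at h2
      rw [h2, star (n : Int) (by positivity) m hm9]
      -- unfold B and strip the identity c = 0 group
      rw [dpBgo_succ _ _ hne,
          PySem.List.pyRange_one_cons (show (0 : Int) < min 3 ((n : Int) + 1) + 1 by omega)]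
      simp only [List.flatMap_cons]
      rw [show ((n : Int) + 1 - 0) = (n : Int) + 1 by ring, show (0 : Int) + 1 = 1 by ring]
      have hid : (dpBgo ((n : Int) + 1) m).map (fun h => h.set m (0 : Int)) =
          dpBgo ((n : Int) + 1) m :=
        pv_map_id_of _ _ (fun h hh => pv_set_eq_self _ _ ((dpBgo_inv m _ h hh).2 m le_rfl))
      rw [hid]

-- ===== VERDICT (by name: the statement is the Claim_ definition above) =====
theorem dp_spec : Claim_equal_dp := by
  intro rem max_d _ hpre
  unfold Spec_dp dp dp_alt
  unfold Pre_dp at hpre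
  rcases hpre with h0 | ⟨hpos, h9⟩ | ⟨hneg, hmd⟩
  · subst h0
    norm_num [dpAgo, dpBgo_zero]
  · have hrn : ((rem.toNat : Int)) = rem := Int.toNat_of_nonneg (by omega)
    by_cases hlt : -1 ≤ max_d
    · have hm10 : (max_d + 1).toNat ≤ 10 := by omega
      have hmd1 : (((max_d + 1).toNat : Int)) - 1 = max_d := by omega
      have h := main_lemma rem.toNat (max_d + 1).toNat hm10
      rw [hrn, hmd1] at h
      exact h
    · rw [dpAgo_succ _ _ _ (by omega)]
      rw [PySem.List.pyRange_one_eq_nil (by omega : max_d + 1 ≤ 0)]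
      rw [show (max_d + 1).toNat = 0 by omega]
      simp [dpBgo, show rem ≠ 0 by omega]
  · rw [show rem.toNat = 0 by omega, dpAgo_succ 0 _ _ (by omega)]
    rw [PySem.List.pyRange_one_eq_nil (by omega : max_d + 1 ≤ 0)]
    rw [show (max_d + 1).toNat = 0 by omega]
    simp [dpBgo, show rem ≠ 0 by omega]
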